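-- pv_equiv track=rewrite | github.com/gottie29/AllSkyKamera | setupui/cron_service.py | remove_legacy_option_autocron_lines
-- ===== SOURCE A (Python) =====
-- LEGACY_OPTIONS_COMMENTS = {
--     "KpIndex Logger",
--     "Meteor Detection",
-- }
--
-- def remove_legacy_option_autocron_lines(raw_crontab: str) -> str:
--     if not raw_crontab.strip():
--         return ""
--
--     lines = raw_crontab.splitlines()
--     out = []
--     skip_next = False
--
--     for i, line in enumerate(lines):
--         if skip_next:
--             skip_next = False
--             continue
--
--         stripped = line.strip()
--
--         if stripped.startswith("# AUTOCRON:"):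
--             comment = stripped.replace("# AUTOCRON:", "", 1).strip()
--
--             if comment in LEGACY_OPTIONS_COMMENTS:
--                 if i + 1 < len(lines):
--                     next_line = lines[i + 1].strip()
--                     if next_line and not next_line.startswith("#"):
--                         skip_next = True
--                 continue
--
--         out.append(line)
--
--     cleaned = "\n".join(out).strip()
--     return cleaned + ("\n" if cleaned else "")
-- ===== SOURCE B (Python) =====
-- LEGACY_OPTIONS_COMMENTS = {
--     "KpIndex Logger",
--     "Meteor Detection",
-- }
--
-- _PREFIX = "# AUTOCRON:"
--
--
-- def _is_legacy_header(line):
--     s = line.strip()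
--     return s.startswith(_PREFIX) and s[len(_PREFIX):].strip() in LEGACY_OPTIONS_COMMENTS
--
--
-- def _is_command(line):
--     s = line.strip()
--     return bool(s) and not s.startswith("#")
--
--
-- def remove_legacy_option_autocron_lines(raw_crontab: str) -> str:
--     if not raw_crontab.strip():
--         return ""
--     lines = raw_crontab.splitlines()
--     prev_legacy = [False] + [_is_legacy_header(l) for l in lines[:-1]]
--     out = [l for l, p in zip(lines, prev_legacy)
--            if not _is_legacy_header(l) and not (p and _is_command(l))]
--     cleaned = "\n".join(out).strip()
--     return cleaned + ("\n" if cleaned else "")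
-- ===== Notes on version B (the rewrite author's own statement) =====
-- stated objective: simpler
-- what changed: A's single stateful pass with a skip_next flag and a lines[i+1] lookahead is replaced by a stateless two-pass decomposition: precompute a shifted boolean list marking lines whose predecessor is a legacy AUTOCRON header, zip it with the lines, and keep a line iff it is neither such a header nor a command directly after one.
import Mathlib
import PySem

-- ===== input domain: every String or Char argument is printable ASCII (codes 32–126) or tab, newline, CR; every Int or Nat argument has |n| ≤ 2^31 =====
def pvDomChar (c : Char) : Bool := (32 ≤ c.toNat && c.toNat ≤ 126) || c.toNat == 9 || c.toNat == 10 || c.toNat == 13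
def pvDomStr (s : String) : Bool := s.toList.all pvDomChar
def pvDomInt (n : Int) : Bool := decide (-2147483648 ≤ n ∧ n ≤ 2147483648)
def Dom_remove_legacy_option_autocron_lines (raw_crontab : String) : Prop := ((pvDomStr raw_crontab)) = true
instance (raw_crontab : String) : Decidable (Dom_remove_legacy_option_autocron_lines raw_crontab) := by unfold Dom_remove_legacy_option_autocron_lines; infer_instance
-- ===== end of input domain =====

-- B replaces A's stateful skip-next loop by a two-pass decomposition (a shifted boolean list of legacy-header positions zipped with the lines, then one filter); objective: simpler, not measurably faster.

-- ===== PORT A =====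
def LEGACY_OPTIONS_COMMENTS : PySem.Set String := PySem.Set.ofList ["KpIndex Logger", "Meteor Detection"]

-- hand port of Python's s.replace(old, new, 1) (PySem.Str.replace has no count argument):
-- replace only the FIRST occurrence; exact, incl. old = "" (new is inserted at the front, as CPython does)
def replaceOnce (s old new : String) : String :=
  let i := PySem.Str.find s old
  if i = -1 then s
  else String.ofList (s.toList.take i.toNat ++ new.toList ++ s.toList.drop (i.toNat + old.toList.length))

-- A's for-loop: structural recursion over the lines; lines[i+1] is the head of the remaining list
def loopA : List String → Bool → List String
  | [], _ => []
  | line :: rest, skip =>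
    if skip then loopA rest false
    else
      let stripped := PySem.Str.strip line
      if PySem.Str.startswith stripped "# AUTOCRON:" then
        let comment := PySem.Str.strip (replaceOnce stripped "# AUTOCRON:" "")
        if PySem.Set.contains LEGACY_OPTIONS_COMMENTS comment then
          match rest with
          | [] => loopA rest false   -- i + 1 < len(lines) fails: skip_next stays False
          | next :: _ =>
            let next_line := PySem.Str.strip next
            if !(next_line == "") && !(PySem.Str.startswith next_line "#") then loopA rest true
            else loopA rest false
        else line :: loopA rest false
      else line :: loopA rest false

def remove_legacy_option_autocron_lines (raw_crontab : String) : String :=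
  if PySem.Str.strip raw_crontab = "" then ""
  else
    let lines := PySem.Str.splitlines raw_crontab
    let out := loopA lines false
    let cleaned := PySem.Str.strip (PySem.Str.join "\n" out)
    cleaned ++ (if cleaned ≠ "" then "\n" else "")

-- ===== PORT B =====
def autocronPrefix : String := "# AUTOCRON:"

def isLegacyHeader (line : String) : Bool :=
  let s := PySem.Str.strip line
  PySem.Str.startswith s autocronPrefix &&
    PySem.Set.contains LEGACY_OPTIONS_COMMENTS
      (PySem.Str.strip (PySem.Str.slice s (some (PySem.Str.len autocronPrefix)) none))

def isCommand (line : String) : Bool :=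
  let s := PySem.Str.strip line
  !(s == "") && !(PySem.Str.startswith s "#")

def remove_legacy_option_autocron_lines_alt (raw_crontab : String) : String :=
  if PySem.Str.strip raw_crontab = "" then ""
  else
    let lines := PySem.Str.splitlines raw_crontab
    let prevLegacy := false :: (PySem.List.slice lines none (some (-1))).map isLegacyHeader
    let out := ((lines.zip prevLegacy).filter
        (fun lp => !isLegacyHeader lp.1 && !(lp.2 && isCommand lp.1))).map (·.1)
    let cleaned := PySem.Str.strip (PySem.Str.join "\n" out)
    cleaned ++ (if cleaned ≠ "" then "\n" else "")

-- ===== PRECONDITION & SPEC =====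
def Spec_remove_legacy_option_autocron_lines (raw_crontab : String) (out : String) : Prop := out = remove_legacy_option_autocron_lines_alt raw_crontab
instance (raw_crontab : String) (out : String) : Decidable (Spec_remove_legacy_option_autocron_lines raw_crontab out) := by unfold Spec_remove_legacy_option_autocron_lines; infer_instance

-- ===== CLAIM (what is proved, stated in full; the proofs are below) =====
def Claim_equal_remove_legacy_option_autocron_lines : Prop := ∀ (raw_crontab : String), Dom_remove_legacy_option_autocron_lines raw_crontab → Spec_remove_legacy_option_autocron_lines raw_crontab (remove_legacy_option_autocron_lines raw_crontab)

-- ===== LEMMAS AND PROOFS =====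

set_option maxHeartbeats 1000000

-- B's zip-and-filter, with the previous-line flag made explicit (proof-only helper)
def outB (ls : List String) (p : Bool) : List String :=
  ((ls.zip (p :: ls.dropLast.map isLegacyHeader)).filter
      (fun lp => !isLegacyHeader lp.1 && !(lp.2 && isCommand lp.1))).map (·.1)

-- the same selection, written as a recursion (proof-only helper)
def outR : List String → Bool → List String
  | [], _ => []
  | l :: rest, p =>
    (if !isLegacyHeader l && !(p && isCommand l) then [l] else []) ++ outR rest (isLegacyHeader l)

-- the skip flag A carries when it is about to process ls, given the flag p of the line before ls
def skipOf (p : Bool) : List String → Bool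
  | [] => false
  | l :: _ => p && isCommand l

lemma skipOf_false (ls : List String) : skipOf false ls = false := by
  cases ls <;> simp [skipOf]

lemma outR_cons (l : String) (rest : List String) (p : Bool) :
    outR (l :: rest) p =
      (if !isLegacyHeader l && !(p && isCommand l) then [l] else []) ++ outR rest (isLegacyHeader l) := rfl

lemma outB_eq_outR : ∀ (ls : List String) (p : Bool), outB ls p = outR ls p := by
  intro ls
  induction ls with
  | nil => intro p; rfl
  | cons l rest ih =>
    intro p
    rw [outR_cons, ← ih (isLegacyHeader l)]
    cases rest with
    | nil =>
      have hd : ([l] : List String).dropLast = [] := rfl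
      simp only [outB, hd, List.map_nil, List.zip_cons_cons, List.zip_nil_left,
        List.filter_cons, List.filter_nil]
      cases h : (!isLegacyHeader l && !(p && isCommand l)) <;>
        simp only [h, Bool.false_eq_true, if_false, if_true, List.map_cons, List.map_nil,
          List.nil_append, List.append_nil]
    | cons r rs =>
      simp only [outB, List.dropLast_cons₂, List.map_cons, List.zip_cons_cons, List.filter_cons]
      cases h : (!isLegacyHeader l && !(p && isCommand l)) <;>
        simp only [h, Bool.false_eq_true, if_false, if_true, eq_self_iff_true, List.map_cons,
          List.nil_append, List.singleton_append]

lemma find_eq_zero_of_startswith (s p : String) (h : PySem.Str.startswith s p = true) :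
    PySem.Str.find s p = 0 := by
  have hpre : p.toList <+: s.toList := by
    rw [PySem.Str.startswith_eq] at h
    exact (PySem.Chars.startswith_iff _ _).mp h
  have hnn : 0 ≤ PySem.Chars.find s.toList p.toList :=
    (PySem.Chars.find_nonneg_iff _ _).mpr hpre.isInfix
  rw [PySem.Str.find_eq]
  by_contra hne
  have hpos : 0 < (PySem.Chars.find s.toList p.toList).toNat := by omega
  exact (PySem.Chars.find_spec hnn).2 0 hpos (by simpa using hpre)

-- A's "remove the first '# AUTOCRON:' occurrence" equals B's "slice off the prefix"
lemma replaceOnce_eq_slice (s : String) (h : PySem.Str.startswith s "# AUTOCRON:" = true) :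
    replaceOnce s "# AUTOCRON:" "" =
      PySem.Str.slice s (some (PySem.Str.len "# AUTOCRON:")) none := by
  apply String.ext
  have hf := find_eq_zero_of_startswith s "# AUTOCRON:" h
  have hl11 : PySem.Str.len "# AUTOCRON:" = (11 : Int) := by decide
  rw [PySem.Str.toList_slice, PySem.Chars.slice_eq_listSlice, hl11,
    PySem.List.slice_from s.toList (by norm_num)]
  simp only [replaceOnce, hf]
  rw [if_neg (by norm_num)]
  have hlen : ("# AUTOCRON:".toList).length = 11 := by decide
  simp [hlen]

-- A's inline legacy test agrees with B's isLegacyHeader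
lemma legacyA_eq (l : String) :
    isLegacyHeader l =
      (PySem.Str.startswith (PySem.Str.strip l) "# AUTOCRON:" &&
        PySem.Set.contains LEGACY_OPTIONS_COMMENTS
          (PySem.Str.strip (replaceOnce (PySem.Str.strip l) "# AUTOCRON:" ""))) := by
  simp only [isLegacyHeader, autocronPrefix]
  cases hsw : PySem.Str.startswith (PySem.Str.strip l) "# AUTOCRON:" with
  | false => rw [Bool.false_and, Bool.false_and]
  | true => rw [Bool.true_and, Bool.true_and, replaceOnce_eq_slice _ hsw]

-- a legacy header line is never a command line (its stripped form starts with '#')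
lemma legacy_not_command (l : String) (h : isLegacyHeader l = true) : isCommand l = false := by
  simp only [isLegacyHeader, Bool.and_eq_true] at h
  have h1 := h.1
  rw [autocronPrefix, PySem.Str.startswith_eq] at h1
  have hsw2 : PySem.Chars.startswith (PySem.Chars.strip l.toList) ['#'] = true := by
    rw [← PySem.Str.toList_strip]
    exact (PySem.Chars.startswith_iff _ _).mpr
      (List.IsPrefix.trans (by decide) ((PySem.Chars.startswith_iff _ _).mp h1))
  simp [isCommand, hsw2]

lemma loopA_eq_outR : ∀ (ls : List String) (p : Bool), loopA ls (skipOf p ls) = outR ls p := by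
  intro ls
  induction ls with
  | nil => intro p; rfl
  | cons l rest ih =>
    intro p
    have ihf : loopA rest false = outR rest false := by
      have h2 := ih false
      rw [skipOf_false rest] at h2
      exact h2
    show loopA (l :: rest) (p && isCommand l) = _
    rw [outR_cons]
    cases hpc : p && isCommand l with
    | true =>
      have hcmd : isCommand l = true := (Bool.and_eq_true _ _ |>.mp hpc).2
      have hleg : isLegacyHeader l = false := by
        cases hL : isLegacyHeader l
        · rfl
        · rw [legacy_not_command l hL] at hcmd; exact absurd hcmd (by simp)
      simp only [loopA, hleg, hpc, eq_self_iff_true, if_true, Bool.not_false, Bool.not_true,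
        Bool.true_and, Bool.false_eq_true, if_false, List.nil_append]
      exact ihf
    | false =>
      simp only [loopA, Bool.false_eq_true, if_false]
      cases hsw : PySem.Str.startswith (PySem.Str.strip l) "# AUTOCRON:" with
      | false =>
        have hleg : isLegacyHeader l = false := by
          rw [legacyA_eq l, hsw, Bool.false_and]
        simp only [hsw, Bool.false_eq_true, if_false, hleg, hpc, Bool.not_false, Bool.true_and,
          eq_self_iff_true, if_true, List.singleton_append, ihf]
      | true =>
        simp only [hsw, eq_self_iff_true, if_true]
        cases hmem : PySem.Set.contains LEGACY_OPTIONS_COMMENTS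
            (PySem.Str.strip (replaceOnce (PySem.Str.strip l) "# AUTOCRON:" "")) with
        | false =>
          have hleg : isLegacyHeader l = false := by
            rw [legacyA_eq l, hsw, Bool.true_and, hmem]
          simp only [hmem, Bool.false_eq_true, if_false, hleg, hpc, Bool.not_false, Bool.true_and,
            eq_self_iff_true, if_true, List.singleton_append, ihf]
        | true =>
          have hleg : isLegacyHeader l = true := by
            rw [legacyA_eq l, hsw, Bool.true_and, hmem]
          simp only [hmem, eq_self_iff_true, if_true, hleg, Bool.not_true, Bool.false_and,
            Bool.false_eq_true, if_false, List.nil_append]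
          rw [← ih true]
          cases rest with
          | nil => rfl
          | cons n ns =>
            show (if isCommand n = true then loopA (n :: ns) true else loopA (n :: ns) false) = _
            simp only [skipOf, Bool.true_and]
            cases hc : isCommand n <;> simp [hc]

lemma loopA_false_eq (ls : List String) : loopA ls false = outB ls false := by
  have h := loopA_eq_outR ls false
  rw [skipOf_false] at h
  rw [outB_eq_outR]
  exact h

-- ===== VERDICT (by name: the statement is the Claim_ definition above) =====
theorem remove_legacy_option_autocron_lines_spec : Claim_equal_remove_legacy_option_autocron_lines := by
  intro raw _
  show remove_legacy_option_autocron_lines raw = remove_legacy_option_autocron_lines_alt raw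
  by_cases h : PySem.Str.strip raw = ""
  · simp only [remove_legacy_option_autocron_lines, remove_legacy_option_autocron_lines_alt,
      if_pos h]
  · have key : ∀ ls : List String,
        loopA ls false =
          ((ls.zip (false :: (PySem.List.slice ls none (some (-1))).map isLegacyHeader)).filter
              (fun lp => !isLegacyHeader lp.1 && !(lp.2 && isCommand lp.1))).map (·.1) := by
      intro ls
      rw [PySem.List.slice_to_neg_one, loopA_false_eq]
      rfl
    simp only [remove_legacy_option_autocron_lines, remove_legacy_option_autocron_lines_alt,
      if_neg h, key]
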